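-- pv_equiv track=rewrite | github.com/alexeybutyrev/leetcode-solutions | solutions/Find Maximum Balanced XOR Subarray Length/solution.py | maxBalancedSubarray
-- ===== SOURCE A (Python) =====
-- from typing import List
--
-- def maxBalancedSubarray(A: List[int]) -> int:
--     d = {(0,0):-1}
--
--     p = ans = xor = 0
--     for i,x in enumerate(A):
--         xor ^= x
--         p += 1 if x & 1 else -1
--         t = (p,xor)
--         if t in d:
--             ans = max(ans,i - d[t])
--         else:
--             d[t] = i
--     return ans
-- ===== SOURCE B (Python) =====
-- from typing import List
--
-- def maxBalancedSubarray(A: List[int]) -> int: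
--     # Naive brute force: build the full prefix-state table (parity balance,
--     # running xor), then check EVERY pair 0 <= i < j of prefix positions and
--     # take the longest gap with equal states.  No first-occurrence structure.
--     pref = [(0, 0)]
--     p = xor = 0
--     for x in A:
--         xor ^= x
--         p += 1 if x & 1 else -1
--         pref.append((p, xor))
--     ans = 0
--     for j, sj in enumerate(pref):
--         for i, si in enumerate(pref[:j]):
--             if si == sj:
--                 ans = max(ans, j - i)
--     return ans
-- ===== Notes on version B (the rewrite author's own statement) =====
-- stated objective: alternative
-- what changed: Replaces A's single-pass first-occurrence hashmap with a plain brute force: build the full prefix-state table, then compare every pair of prefix positions and keep the longest gap with equal (parity, xor) state.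
import Mathlib
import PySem

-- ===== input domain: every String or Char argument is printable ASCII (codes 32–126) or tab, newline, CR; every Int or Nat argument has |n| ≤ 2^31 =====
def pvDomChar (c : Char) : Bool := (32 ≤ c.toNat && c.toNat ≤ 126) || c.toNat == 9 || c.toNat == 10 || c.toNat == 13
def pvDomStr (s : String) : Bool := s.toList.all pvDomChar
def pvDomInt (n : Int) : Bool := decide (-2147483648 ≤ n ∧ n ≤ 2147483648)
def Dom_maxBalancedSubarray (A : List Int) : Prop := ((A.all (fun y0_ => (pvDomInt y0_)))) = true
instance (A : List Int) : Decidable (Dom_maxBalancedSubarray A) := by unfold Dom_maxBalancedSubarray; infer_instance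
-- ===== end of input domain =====

-- B replaces A's single-pass first-occurrence hashmap with a naive brute force:
-- it builds the full prefix-state table and compares every pair of positions
-- (alternative decomposition, not faster).


-- ===== PORT A =====
def maxBalancedSubarray (A : List Int) : Int :=
  let st := (PySem.List.enumerate A 0).foldl
    (fun (st : PySem.Dict (Int × Int) Int × Int × Int × Int) ix =>
      let d := st.1; let p := st.2.1; let ans := st.2.2.1; let xor := st.2.2.2
      let xor' := PySem.Int.bxor xor ix.2
      let p' := p + (if PySem.Int.band ix.2 1 ≠ 0 then 1 else -1)
      let t := (p', xor')
      if d.contains t then (d, p', max ans (ix.1 - d.getD t 0), xor')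
      else (d.insert t ix.1, p', ans, xor'))
    ((PySem.Dict.empty).insert ((0 : Int), (0 : Int)) (-1), 0, 0, 0)
  st.2.2.1

-- ===== PORT B =====
def maxBalancedSubarray_alt (A : List Int) : Int :=
  let st := A.foldl
    (fun (st : List (Int × Int) × Int × Int) x =>
      let xor' := PySem.Int.bxor st.2.2 x
      let p' := st.2.1 + (if PySem.Int.band x 1 ≠ 0 then 1 else -1)
      (st.1 ++ [(p', xor')], p', xor'))
    ([((0 : Int), (0 : Int))], 0, 0)
  let pref := st.1
  (PySem.List.enumerate pref 0).foldl
    (fun ans js =>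
      (PySem.List.enumerate (PySem.List.slice pref none (some js.1)) 0).foldl
        (fun a is => if is.2 = js.2 then max a (js.1 - is.1) else a) ans)
    0

-- ===== PRECONDITION & SPEC =====
def Spec_maxBalancedSubarray (A : List Int) (out : Int) : Prop := out = maxBalancedSubarray_alt A
instance (A : List Int) (out : Int) : Decidable (Spec_maxBalancedSubarray A out) := by unfold Spec_maxBalancedSubarray; infer_instance

-- ===== CLAIM (what is proved, stated in full; the proofs are below) =====
def Claim_equal_maxBalancedSubarray : Prop := ∀ (A : List Int), Dom_maxBalancedSubarray A → Spec_maxBalancedSubarray A (maxBalancedSubarray A)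

-- ===== LEMMAS AND PROOFS =====

-- the per-element state update shared by both programs: (parity balance, running xor)
def pvStep (s : Int × Int) (a : Int) : Int × Int :=
  (s.1 + (if PySem.Int.band a 1 ≠ 0 then 1 else -1), PySem.Int.bxor s.2 a)

-- the list of states produced after each element of the input, starting from state s
def pvStates (s : Int × Int) : List Int → List (Int × Int)
  | [] => []
  | a :: t => pvStep s a :: pvStates (pvStep s a) t

-- common abstract loop both ports are reduced to
def pvG (P : List (Int × Int)) (s : Int × Int) : List Int → Int → Int
  | [], ans => ans
  | a :: t, ans =>
    let s' := pvStep s a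
    pvG (P ++ [s']) s' t
      (if s' ∈ P then max ans ((P.length : Int) - (((PySem.List.index? P s').getD 0 : Nat) : Int)) else ans)

lemma pvBuild (rest : List Int) : ∀ (acc : List (Int × Int)) (p x : Int),
    (rest.foldl
      (fun (st : List (Int × Int) × Int × Int) y =>
        let xor' := PySem.Int.bxor st.2.2 y
        let p' := st.2.1 + (if PySem.Int.band y 1 ≠ 0 then 1 else -1)
        (st.1 ++ [(p', xor')], p', xor'))
      (acc, p, x)).1 = acc ++ pvStates (p, x) rest := by
  induction rest with
  | nil => intro acc p x; simp [pvStates]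
  | cons a t ih =>
    intro acc p x
    simp only [List.foldl_cons, pvStates]
    rw [ih]
    simp [pvStep, List.append_assoc]

lemma pvIdxAppend {α : Type} [BEq α] [LawfulBEq α] (P : List α) (c : α) (h : c ∈ P) (t : α) :
    PySem.List.index? (P ++ [c]) t = PySem.List.index? P t := by
  by_cases ht : t ∈ P
  · exact PySem.List.index?_append_of_mem _ ht
  · rw [(PySem.List.index?_eq_none_iff P t).2 ht, (PySem.List.index?_eq_none_iff _ t).2]
    simp only [List.mem_append, List.mem_singleton]
    rintro (h1 | rfl) <;> exact ht (by assumption)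

lemma pvLoopA (rest : List Int) : ∀ (n : Nat) (P : List (Int × Int))
    (d : PySem.Dict (Int × Int) Int) (ans p x : Int),
    P.length = n + 1 →
    (∀ t, d.get? t = (PySem.List.index? P t).map (fun k => (k : Int) - 1)) →
    ((PySem.List.enumerate rest (n : Int)).foldl
      (fun (st : PySem.Dict (Int × Int) Int × Int × Int × Int) ix =>
        let d := st.1; let p := st.2.1; let ans := st.2.2.1; let xor := st.2.2.2
        let xor' := PySem.Int.bxor xor ix.2
        let p' := p + (if PySem.Int.band ix.2 1 ≠ 0 then 1 else -1)
        let t := (p', xor')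
        if d.contains t then (d, p', max ans (ix.1 - d.getD t 0), xor')
        else (d.insert t ix.1, p', ans, xor'))
      (d, p, ans, x)).2.2.1 = pvG P (p, x) rest ans := by
  induction rest with
  | nil => intro n P d ans p x hn hd; simp [PySem.List.enumerate, pvG]
  | cons a t ih =>
    intro n P d ans p x hn hd
    rw [PySem.List.enumerate_cons, List.foldl_cons]
    simp only []
    have hstep : (p + (if PySem.Int.band a 1 ≠ 0 then 1 else -1), PySem.Int.bxor x a)
        = pvStep (p, x) a := rfl
    have hcon : d.contains (pvStep (p, x) a) = (PySem.List.index? P (pvStep (p, x) a)).isSome := by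
      rw [PySem.Dict.contains_eq_isSome_get?, hd]
      cases PySem.List.index? P (pvStep (p, x) a) <;> rfl
    by_cases hm : pvStep (p, x) a ∈ P
    · obtain ⟨k, hk⟩ := Option.isSome_iff_exists.1 ((PySem.List.index?_isSome_iff P _).2 hm)
      have hct : d.contains (pvStep (p, x) a) = true := by
        rw [hcon, hk]; rfl
      rw [hstep, hct, if_pos rfl]
      have hD : d.getD (pvStep (p, x) a) 0 = (k : Int) - 1 := by
        rw [PySem.Dict.getD_eq_get?_getD, hd, hk]; rfl
      rw [hD]
      have hmain := ih (n + 1) (P ++ [pvStep (p, x) a]) d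
        (max ans ((n : Int) - ((k : Int) - 1)))
        (p + (if PySem.Int.band a 1 ≠ 0 then 1 else -1)) (PySem.Int.bxor x a)
        (by simp [hn]) (by intro u; rw [hd, pvIdxAppend P _ hm])
      push_cast at hmain
      rw [hmain, pvG]
      simp only [hstep, if_pos hm, hk, Option.getD_some]
      congr 2
      rw [hn]; push_cast; ring
    · have hnone : PySem.List.index? P (pvStep (p, x) a) = none :=
        (PySem.List.index?_eq_none_iff P _).2 hm
      have hct : d.contains (pvStep (p, x) a) = false := by
        rw [hcon, hnone]; rfl
      rw [hstep, hct, if_neg (by simp)]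
      have hinv : ∀ u, (d.insert (pvStep (p, x) a) (n : Int)).get? u
          = (PySem.List.index? (P ++ [pvStep (p, x) a]) u).map (fun k => (k : Int) - 1) := by
        intro u
        by_cases hu : u = pvStep (p, x) a
        · subst hu
          rw [PySem.Dict.get?_insert_self, PySem.List.index?_append_singleton_self P _ hm, hn]
          simp
        · rw [PySem.Dict.get?_insert_of_ne _ _ hu, hd]
          by_cases hup : u ∈ P
          · rw [PySem.List.index?_append_of_mem _ hup]
          · rw [(PySem.List.index?_eq_none_iff P u).2 hup, (PySem.List.index?_eq_none_iff _ u).2]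
            simp only [List.mem_append, List.mem_singleton]
            rintro (h1 | rfl) <;> [exact hup h1; exact hu rfl]
      have hmain := ih (n + 1) (P ++ [pvStep (p, x) a]) (d.insert (pvStep (p, x) a) (n : Int)) ans
        (p + (if PySem.Int.band a 1 ≠ 0 then 1 else -1)) (PySem.Int.bxor x a)
        (by simp [hn]) hinv
      push_cast at hmain
      rw [hmain, pvG]
      simp only [hstep, if_neg hm]

-- B's inner scan over enumerate, abstracted
def pvInner (s : Int × Int) (j : Int) (L : List (Int × Int)) (k ans : Int) : Int :=
  (PySem.List.enumerate L k).foldl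
    (fun a is => if is.2 = s then max a (j - is.1) else a) ans

lemma pvInner_absorb (s : Int × Int) (j : Int) (L : List (Int × Int)) :
    ∀ (k ans : Int), j - k ≤ ans → pvInner s j L k ans = ans := by
  induction L with
  | nil => intro k ans _; rfl
  | cons a t ih =>
    intro k ans h
    rw [pvInner, PySem.List.enumerate_cons, List.foldl_cons]
    by_cases ha : a = s
    · rw [if_pos ha, max_eq_left (by omega)]
      exact ih (k + 1) ans (by omega)
    · rw [if_neg ha]; exact ih (k + 1) ans (by omega)

lemma pvInner_eq (s : Int × Int) (j : Int) (L : List (Int × Int)) :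
    ∀ (k ans : Int),
    pvInner s j L k ans =
      match PySem.List.index? L s with
      | none => ans
      | some m => max ans (j - (k + (m : Int))) := by
  induction L with
  | nil => intro k ans; rfl
  | cons a t ih =>
    intro k ans
    rw [pvInner, PySem.List.enumerate_cons, List.foldl_cons]
    by_cases ha : a = s
    · subst ha
      rw [PySem.List.index?_cons_self]
      simp only [if_true]
      have := pvInner_absorb a j t (k + 1) (max ans (j - k)) (by omega)
      rw [pvInner] at this
      rw [this]
      norm_num
    · rw [PySem.List.index?_cons_of_ne _ ha, if_neg ha]
      have := ih (k + 1) ans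
      rw [pvInner] at this
      rw [this]
      cases PySem.List.index? t s with
      | none => rfl
      | some m => simp only [Option.map_some]; congr 1; push_cast; ring

lemma pvLoopB (rest : List Int) : ∀ (P : List (Int × Int)) (s : Int × Int) (ans : Int)
    (full : List (Int × Int)), full = P ++ pvStates s rest →
    (PySem.List.enumerate (pvStates s rest) ((P.length : Nat) : Int)).foldl
      (fun ans js =>
        (PySem.List.enumerate (PySem.List.slice full none (some js.1)) 0).foldl
          (fun a is => if is.2 = js.2 then max a (js.1 - is.1) else a) ans) ans
    = pvG P s rest ans := by
  induction rest with
  | nil => intro P s ans full _; simp [pvStates, pvG]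
  | cons a t ih =>
    intro P s ans full hfull
    rw [show pvStates s (a :: t) = pvStep s a :: pvStates (pvStep s a) t from rfl,
        PySem.List.enumerate_cons, List.foldl_cons]
    simp only []
    have hslice : PySem.List.slice full none (some ((P.length : Nat) : Int)) = P := by
      rw [PySem.List.slice_to_natCast, hfull]
      exact List.take_left
    rw [hslice]
    have hin := pvInner_eq (pvStep s a) ((P.length : Nat) : Int) P 0 ans
    rw [pvInner] at hin
    rw [hin, pvG]
    have hrec := ih (P ++ [pvStep s a]) (pvStep s a)
      (if pvStep s a ∈ P then
        max ans ((P.length : Int) - (((PySem.List.index? P (pvStep s a)).getD 0 : Nat) : Int))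
       else ans)
      full (by rw [hfull]; simp [pvStates])
    rw [← hrec]
    have hlen : (((P ++ [pvStep s a]).length : Nat) : Int) = ((P.length : Nat) : Int) + 1 := by
      simp
    rw [hlen]
    congr 1
    by_cases hm : pvStep s a ∈ P
    · obtain ⟨m, hk⟩ := Option.isSome_iff_exists.1 ((PySem.List.index?_isSome_iff P _).2 hm)
      rw [hk, if_pos hm]
      simp only [Option.getD_some]
      norm_num
    · rw [(PySem.List.index?_eq_none_iff P _).2 hm, if_neg hm]

-- invariant of A's initial dict against the initial prefix list
lemma pvInv0 : ∀ t, ((PySem.Dict.empty).insert ((0 : Int), (0 : Int)) (-1)).get? t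
    = (PySem.List.index? [((0 : Int), (0 : Int))] t).map (fun k => (k : Int) - 1) := by
  intro t
  by_cases ht : t = ((0 : Int), (0 : Int))
  · subst ht
    rw [PySem.Dict.get?_insert_self, PySem.List.index?_cons_self]
    rfl
  · rw [PySem.Dict.get?_insert_of_ne _ _ ht, PySem.Dict.get?_empty,
        PySem.List.index?_cons_of_ne _ (fun h => ht h.symm),
        (PySem.List.index?_eq_none_iff _ t).2 (List.not_mem_nil)]
    rfl

-- ===== VERDICT (by name: the statement is the Claim_ definition above) =====
theorem maxBalancedSubarray_spec : Claim_equal_maxBalancedSubarray := by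
  intro A _
  show maxBalancedSubarray A = maxBalancedSubarray_alt A
  unfold maxBalancedSubarray maxBalancedSubarray_alt
  simp only []
  have hA := pvLoopA A 0 [((0 : Int), (0 : Int))]
    ((PySem.Dict.empty).insert ((0 : Int), (0 : Int)) (-1)) 0 0 0 rfl pvInv0
  push_cast at hA
  rw [hA]
  have hpref := pvBuild A [((0 : Int), (0 : Int))] 0 0
  rw [hpref]
  rw [show ([((0 : Int), (0 : Int))] ++ pvStates (0, 0) A)
        = ((0 : Int), (0 : Int)) :: pvStates (0, 0) A from rfl,
      PySem.List.enumerate_cons, List.foldl_cons]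
  have h0 : PySem.List.slice (((0 : Int), (0 : Int)) :: pvStates (0, 0) A) none (some (0 : Int))
      = ([] : List (Int × Int)) := by
    rw [show (0 : Int) = ((0 : Nat) : Int) from rfl, PySem.List.slice_to_natCast]
    simp
  rw [h0]
  have hB := pvLoopB A [((0 : Int), (0 : Int))] ((0 : Int), (0 : Int)) 0
    (((0 : Int), (0 : Int)) :: pvStates (0, 0) A) rfl
  rw [show (((0 : Int), (0 : Int)) :: pvStates (0, 0) A)
        = [((0 : Int), (0 : Int))] ++ pvStates (0, 0) A from rfl] at hB ⊢
  rw [show ((0 : Int) + 1) = ((([((0 : Int), (0 : Int))].length : Nat)) : Int) from rfl]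
  rw [show (PySem.List.enumerate ([] : List (Int × Int)) 0).foldl
        (fun a is => if is.2 = (((0:Int),(0:Int)) : Int × Int) then max a ((0:Int) - is.1) else a) 0
        = (0 : Int) from rfl]
  exact hB.symm
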